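-- pv_equiv track=rewrite | github.com/WingsOfPanda/WP-Data | wpdata/mker/wtfr.py | spread_lists
-- ===== SOURCE A (Python) =====
-- from math import floor, ceil
--
-- def spread_lists(lists, num_shards=8):
--     nested_list = []
--     instance_per_shards = ceil(len(lists) / num_shards)
--     for i in range(num_shards):
--         dir_list = lists[i * instance_per_shards: (i + 1) * instance_per_shards]
--         nested_list_tmp = [dir_list, i]
--         nested_list.append(nested_list_tmp)
--
--     return nested_list
-- ===== SOURCE B (Python) =====
-- def spread_lists(lists, num_shards=8):
--     shards = {}
--     if lists and num_shards > 0: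
--         instance_per_shards = -(-len(lists) // num_shards)
--         for j, x in enumerate(lists):
--             shards.setdefault(j // instance_per_shards, []).append(x)
--     return [[shards.get(i, []), i] for i in range(num_shards)]
-- ===== Notes on version B (the rewrite author's own statement) =====
-- stated objective: alternative
-- what changed: B replaces A's per-shard contiguous slicing (an index-arithmetic slice for each of the num_shards shards) by a single grouping pass over the data that scatters each element into a dict keyed by index // chunk_size, then reads the shards back per index.
-- outside the precondition, e.g. on spread_lists([1], 0): A raises ZeroDivisionError, B returns []
-- crash fix: A raises ZeroDivisionError exactly when num_shards == 0 (ceil of len/0); B returns the empty shard list there, the natural value for zero shards. — e.g. on spread_lists([1], 0): A raises ZeroDivisionError, B returns []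
import Mathlib
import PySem

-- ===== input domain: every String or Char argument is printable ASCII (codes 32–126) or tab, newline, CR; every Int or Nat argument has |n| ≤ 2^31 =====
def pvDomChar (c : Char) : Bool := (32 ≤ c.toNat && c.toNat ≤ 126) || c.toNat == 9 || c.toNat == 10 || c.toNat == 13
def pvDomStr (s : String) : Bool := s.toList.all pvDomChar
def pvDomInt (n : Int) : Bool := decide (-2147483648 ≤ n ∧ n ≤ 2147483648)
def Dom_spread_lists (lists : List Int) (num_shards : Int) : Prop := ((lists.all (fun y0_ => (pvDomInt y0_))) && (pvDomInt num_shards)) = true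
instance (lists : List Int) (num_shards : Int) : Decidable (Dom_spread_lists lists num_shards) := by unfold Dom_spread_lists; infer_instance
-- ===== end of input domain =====

-- B replaces A's num_shards contiguous slices by one grouping pass over the data
-- (dict keyed by j // chunk_size) read back per shard; objective: alternative decomposition, same cost.

-- ===== PORT A =====
-- ceil(len(lists)/num_shards) is ported exactly via the identity ⌈a/b⌉ = -((-a) // b)
-- (Python's float division is exact for these magnitudes, so the ceil of the float is the exact ceil).
def spread_lists (lists : List Int) (num_shards : Int) : List (List Int × Int) :=
  let instance_per_shards : Int :=
    -(PySem.Int.floordiv (-(lists.length : Int)) num_shards)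
  (PySem.List.pyRange 0 num_shards 1).foldl
    (fun nested_list i =>
      nested_list ++
        [(PySem.List.slice lists (some (i * instance_per_shards))
            (some ((i + 1) * instance_per_shards)), i)])
    []

-- ===== PORT B =====
def spread_lists_alt (lists : List Int) (num_shards : Int) : List (List Int × Int) :=
  let shards : PySem.Dict Int (List Int) :=
    if lists ≠ [] ∧ 0 < num_shards then
      let instance_per_shards : Int :=
        -(PySem.Int.floordiv (-(lists.length : Int)) num_shards)
      (PySem.List.enumerate lists).foldl
        (fun d p =>
          d.modify (PySem.Int.floordiv p.1 instance_per_shards) [] (· ++ [p.2]))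
        PySem.Dict.empty
    else PySem.Dict.empty
  (PySem.List.pyRange 0 num_shards 1).map (fun i => (shards.getD i [], i))

-- ===== PRECONDITION & SPEC =====
-- Pre_ excludes exactly num_shards = 0, where A raises ZeroDivisionError.
def Pre_spread_lists (lists : List Int) (num_shards : Int) : Prop := num_shards ≠ 0
instance (lists : List Int) (num_shards : Int) : Decidable (Pre_spread_lists lists num_shards) := by unfold Pre_spread_lists; infer_instance
def pvWitness_spread_lists : List Int × Int := ([1, 2, 3], 2)

-- A raises ZeroDivisionError exactly when num_shards = 0; B returns [] there.
def Raises_spread_lists (lists : List Int) (num_shards : Int) : Prop := num_shards = 0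
instance (lists : List Int) (num_shards : Int) : Decidable (Raises_spread_lists lists num_shards) := by unfold Raises_spread_lists; infer_instance
def pvRaiseWitness_spread_lists : List Int × Int := ([1], 0)
def pvRaiseWitnessOut_spread_lists : List (List Int × Int) := []

def Spec_spread_lists (lists : List Int) (num_shards : Int) (out : List (List Int × Int)) : Prop := out = spread_lists_alt lists num_shards
instance (lists : List Int) (num_shards : Int) (out : List (List Int × Int)) : Decidable (Spec_spread_lists lists num_shards out) := by unfold Spec_spread_lists; infer_instance

-- ===== CLAIM (what is proved, stated in full; the proofs are below) =====
def Claim_equal_spread_lists : Prop := ∀ (lists : List Int) (num_shards : Int), Dom_spread_lists lists num_shards → Pre_spread_lists lists num_shards → Spec_spread_lists lists num_shards (spread_lists lists num_shards)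
def Claim_raises_spread_lists : Prop := (∀ (lists : List Int) (num_shards : Int), Dom_spread_lists lists num_shards → Raises_spread_lists lists num_shards → ¬ Pre_spread_lists lists num_shards) ∧ (Dom_spread_lists (pvRaiseWitness_spread_lists.1) (pvRaiseWitness_spread_lists.2) ∧ Raises_spread_lists (pvRaiseWitness_spread_lists.1) (pvRaiseWitness_spread_lists.2) ∧ spread_lists_alt (pvRaiseWitness_spread_lists.1) (pvRaiseWitness_spread_lists.2) = pvRaiseWitnessOut_spread_lists)

-- ===== LEMMAS AND PROOFS =====

-- elements of xs whose enumerate-index (starting at s) lies in [a, b), in order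
lemma pv_filter_enumerate_interval {α : Type} (xs : List α) (s a b : Int) :
    ((PySem.List.enumerate xs s).filter (fun p => decide (a ≤ p.1) && decide (p.1 < b))).map (·.2)
      = (xs.take (b - s).toNat).drop (a - s).toNat := by
  induction xs generalizing s with
  | nil => simp [PySem.List.enumerate_nil]
  | cons x xs ih =>
    rw [PySem.List.enumerate_cons, List.filter_cons]
    by_cases hb : s < b
    · have htake : ((b - s).toNat) = ((b - (s+1)).toNat) + 1 := by omega
      rw [htake, List.take_succ_cons]
      by_cases ha : a ≤ s
      · have h0 : (a - s).toNat = 0 := by omega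
        have h2 : (a - (s+1)).toNat = 0 := by omega
        rw [h0, List.drop_zero]
        simp only [ha, hb, decide_true, Bool.and_self, if_true, List.map_cons]
        rw [ih (s+1), h2, List.drop_zero]
      · have h1 : (a - s).toNat = (a - (s+1)).toNat + 1 := by omega
        rw [h1, List.drop_succ_cons]
        simp only [ha, decide_false, Bool.false_and, Bool.false_eq_true, if_false]
        rw [ih (s+1)]
    · have h1 : ((b - s).toNat) = 0 := by omega
      have h2 : ((b - (s+1)).toNat) = 0 := by omega
      rw [h1, List.take_zero, List.drop_nil]
      simp only [hb, decide_false, Bool.and_false, Bool.false_eq_true, if_false]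
      rw [ih (s+1), h2, List.take_zero, List.drop_nil]

-- ===== VERDICT (by name: the statement is the Claim_ definition above) =====
theorem spread_lists_spec : Claim_equal_spread_lists := by
  intro lists n _ hpre
  unfold Pre_spread_lists at hpre
  unfold Spec_spread_lists spread_lists spread_lists_alt

  by_cases hn : 0 < n
  · rw [PySem.List.foldl_append_singleton_eq_map, List.nil_append]
    rcases eq_or_ne lists [] with hl | hl
    · subst hl
      simp only [hn, and_true, ne_eq, not_true_eq_false, if_false]
      apply List.map_congr_left
      intro i hi
      have h0 : PySem.Int.floordiv (-(([] : List Int).length : Int)) n = 0 := by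
        rw [show (-(([] : List Int).length : Int)) = 0 by simp,
            PySem.Int.floordiv_eq_iff_of_pos hn]
        constructor <;> simp [hn]
      rw [h0]
      simp [PySem.List.slice, PySem.Dict.getD_empty]
    · simp only [hl, hn, and_true, ne_eq, not_false_iff, if_true]
      set ips : Int := -(PySem.Int.floordiv (-(lists.length : Int)) n) with hips_def
      have hL : 1 ≤ (lists.length : Int) := by
        have := List.length_pos_iff.mpr hl; exact_mod_cast this
      have hips : 0 < ips := by
        have h := (PySem.Int.neg_floordiv_neg_eq_iff_of_pos hn (a := (lists.length : Int)) (q := ips)).mp hips_def.symm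
        nlinarith [h.1, h.2]
      apply List.map_congr_left
      intro i hi
      have hi' := (PySem.List.mem_pyRange_one).mp hi
      have hia : (0:Int) ≤ i * ips := mul_nonneg hi'.1 (le_of_lt hips)
      have hib : (0:Int) ≤ (i+1) * ips := mul_nonneg (by omega) (le_of_lt hips)
      rw [PySem.List.slice_toNat lists hia hib]
      -- dict side
      have hfold :
          ((PySem.List.enumerate lists).foldl
            (fun d p => d.modify (PySem.Int.floordiv p.1 ips) [] (· ++ [p.2]))
            PySem.Dict.empty)
          = (((PySem.List.enumerate lists).map (fun p => (PySem.Int.floordiv p.1 ips, p.2))).foldl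
            (fun d p => d.modify p.1 [] (· ++ [p.2])) PySem.Dict.empty) := by
        rw [List.foldl_map]
      rw [hfold, PySem.Dict.getD_foldl_modify_append, PySem.Dict.getD_empty, List.nil_append,
          List.filter_map, List.map_map]
      have hpred : ∀ p ∈ PySem.List.enumerate lists 0,
          (((fun p => p.1 == i) ∘ (fun p : Int × Int => (PySem.Int.floordiv p.1 ips, p.2))) p)
            = (decide (i * ips ≤ p.1) && decide (p.1 < (i+1) * ips)) := by
        intro p _
        rw [Bool.eq_iff_iff]
        simp only [Function.comp_apply, beq_iff_eq, Bool.and_eq_true, decide_eq_true_eq]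
        exact PySem.Int.floordiv_eq_iff_of_pos hips
      rw [List.filter_congr hpred]
      have := pv_filter_enumerate_interval lists 0 (i * ips) ((i+1) * ips)
      simp only [sub_zero] at this
      rw [show ((fun x : Int × Int => x.2) ∘ (fun p : Int × Int => (PySem.Int.floordiv p.1 ips, p.2))) = (fun x : Int × Int => x.2) from rfl,
          this, List.drop_take]
  · have hn' : n ≤ 0 := by omega
    simp [PySem.List.pyRange_one_eq_nil hn']

@[simp]
theorem spread_lists_raises : Claim_raises_spread_lists := by
  unfold Claim_raises_spread_lists
  exact ⟨fun l n _ h => by simp [Pre_spread_lists, Raises_spread_lists] at *; omega, by decide⟩
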